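-- pv_equiv track=rewrite | github.com/Cosmin013/Facultate | Python/lab4/main.py | dictFromDictionaries
-- ===== SOURCE A (Python) =====
-- def dictFromDictionaries(dict):
--     dictionar = {}
--     for dic in dict:
--         for key in dic:
--             if (key in dictionar):
--                 dictionar[key].append(dic[key])
--             else:
--                 dictionar[key] = []
--                 dictionar[key].append(dic[key])
--     return dictionar
-- ===== SOURCE B (Python) =====
-- def dictFromDictionaries(dict):
--     # phase 1: index the distinct keys in first-appearance order
--     keys = []
--     seen = set()
--     for dic in dict:
--         for key in dic:
--             if key not in seen:
--                 seen.add(key)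
--                 keys.append(key)
--     # phase 2: for each key, collect its values in dict-encounter order
--     return {key: [dic[key] for dic in dict if key in dic] for key in keys}
-- ===== Notes on version B (the rewrite author's own statement) =====
-- stated objective: alternative
-- what changed: A builds the result in one pass, appending each value to its key's list as it is encountered; B first indexes the distinct keys in first-appearance order, then builds the result with a per-key comprehension collecting that key's values across all dicts.
import Mathlib
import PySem

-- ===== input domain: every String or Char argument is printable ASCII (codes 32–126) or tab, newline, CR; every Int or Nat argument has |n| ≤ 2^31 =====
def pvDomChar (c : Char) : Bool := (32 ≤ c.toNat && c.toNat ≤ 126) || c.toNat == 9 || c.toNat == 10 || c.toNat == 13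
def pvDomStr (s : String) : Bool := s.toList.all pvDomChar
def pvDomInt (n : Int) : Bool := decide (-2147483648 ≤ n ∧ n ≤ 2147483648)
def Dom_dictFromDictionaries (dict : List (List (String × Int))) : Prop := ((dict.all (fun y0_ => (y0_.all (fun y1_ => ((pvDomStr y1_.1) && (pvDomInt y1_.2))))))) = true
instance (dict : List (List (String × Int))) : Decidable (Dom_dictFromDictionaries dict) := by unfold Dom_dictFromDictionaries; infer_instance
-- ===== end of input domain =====

-- B replaces A's append-as-you-go single pass by a two-phase traversal (index the
-- distinct keys first, then collect each key's values across the dicts); objective: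
-- alternative decomposition, not faster.

-- ===== PORT A =====
-- A's nested loop: for dic in dict: for key in dic: append dic[key], creating the
-- slot first if absent.  Each inner Python dict is the PySem.Dict its assoc list
-- denotes (insertion order, last value wins), iterated as its items.
def dictFromDictionaries (dict : List (List (String × Int))) : List (String × List Int) :=
  (dict.foldl
    (fun dictionar dic =>
      (PySem.Dict.ofList dic).items.foldl
        (fun dictionar kv =>
          if dictionar.contains kv.1 then
            dictionar.modify kv.1 [] (fun l => l ++ [kv.2])
          else
            (dictionar.insert kv.1 []).modify kv.1 [] (fun l => l ++ [kv.2]))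
        dictionar)
    PySem.Dict.empty).items

-- ===== PORT B =====
-- B: the distinct keys in first-appearance order, then for each key the values of
-- the dicts containing it, in dict-encounter order.
def dictFromDictionaries_alt (dict : List (List (String × Int))) : List (String × List Int) :=
  (PySem.Set.ofList (dict.flatMap (fun dic => (PySem.Dict.ofList dic).keys))).map
    (fun key => (key, dict.filterMap (fun dic => (PySem.Dict.ofList dic).get? key)))

-- ===== PRECONDITION & SPEC =====
def Spec_dictFromDictionaries (dict : List (List (String × Int))) (out : List (String × List Int)) : Prop := out = dictFromDictionaries_alt dict
instance (dict : List (List (String × Int))) (out : List (String × List Int)) : Decidable (Spec_dictFromDictionaries dict out) := by unfold Spec_dictFromDictionaries; infer_instance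

-- ===== CLAIM (what is proved, stated in full; the proofs are below) =====
def Claim_equal_dictFromDictionaries : Prop := ∀ (dict : List (List (String × Int))), Dom_dictFromDictionaries dict → Spec_dictFromDictionaries dict (dictFromDictionaries dict)

-- ===== LEMMAS AND PROOFS =====

-- A's loop body is exactly 'modify key [] (· ++ [value])' (creating an absent slot appends it).
theorem pv_step_eq (d : PySem.Dict String (List Int)) (p : String × Int) :
    (if d.contains p.1 then d.modify p.1 [] (fun l => l ++ [p.2])
     else (d.insert p.1 []).modify p.1 [] (fun l => l ++ [p.2]))
    = d.modify p.1 [] (fun l => l ++ [p.2]) := by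
  split_ifs with h
  · rfl
  · simp only [PySem.Dict.modify, PySem.Dict.getD_insert_self, PySem.Dict.insert_insert_self,
      PySem.Dict.getD_of_not_contains d _ (by simpa using h)]

-- the nested fold is a fold over the flattened item list
theorem pv_nested_eq (dict : List (List (String × Int))) (d : PySem.Dict String (List Int)) :
    dict.foldl
      (fun d dic => (PySem.Dict.ofList dic).items.foldl
        (fun d p => d.modify p.1 [] (fun l => l ++ [p.2])) d) d
    = (dict.flatMap (fun dic => (PySem.Dict.ofList dic).items)).foldl
        (fun d p => d.modify p.1 [] (fun l => l ++ [p.2])) d := by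
  induction dict generalizing d with
  | nil => rfl
  | cons dic rest ih => simp [List.flatMap_cons, List.foldl_append, ih]

-- with nodup keys, filtering a dict's items at a key yields its lookup
theorem pv_filter_items (d : PySem.Dict String Int) (k : String) (h : d.keys.Nodup) :
    ((d.items.filter (fun p => p.1 == k)).map (fun p => p.2)) = (d.get? k).toList := by
  obtain ⟨l⟩ := d
  induction l with
  | nil => rfl
  | cons p rest ih =>
    simp only [PySem.Dict.keys] at h ih
    simp only [List.map_cons, List.nodup_cons, List.mem_map] at h
    rw [List.filter_cons, PySem.Dict.get?_mk_cons]
    by_cases hk : p.1 == k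
    · have hk' : p.1 = k := by simpa using hk
      have : rest.filter (fun q => q.1 == k) = [] := by
        rw [List.filter_eq_nil_iff]
        intro q hq hqk
        exact h.1 ⟨q, hq, by simpa [hk'] using hqk⟩
      simp [hk, this]
    · simp [hk, ih h.2]
  
-- flatMap of Option.toList is filterMap
theorem pv_flatMap_toList {α β : Type} (l : List α) (f : α → Option β) :
    l.flatMap (fun a => (f a).toList) = l.filterMap f := by
  induction l with
  | nil => rfl
  | cons a rest ih => cases hf : f a <;> simp [List.flatMap_cons, hf, ih]

-- ===== VERDICT (by name: the statement is the Claim_ definition above) =====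
theorem dictFromDictionaries_spec : Claim_equal_dictFromDictionaries := by
  intro dict _
  unfold Spec_dictFromDictionaries dictFromDictionaries dictFromDictionaries_alt
  have hstep :
      (fun (d : PySem.Dict String (List Int)) (kv : String × Int) =>
        if d.contains kv.1 then d.modify kv.1 [] (fun l => l ++ [kv.2])
        else (d.insert kv.1 []).modify kv.1 [] (fun l => l ++ [kv.2]))
      = fun d kv => d.modify kv.1 [] (fun l => l ++ [kv.2]) := by
    funext d kv; exact pv_step_eq d kv
  rw [hstep, pv_nested_eq]
  set L := dict.flatMap (fun dic => (PySem.Dict.ofList dic).items) with hL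
  set D := L.foldl (fun d p => d.modify p.1 [] (fun l => l ++ [p.2])) PySem.Dict.empty with hD
  have hnodup : D.keys.Nodup := by
    rw [hD]
    exact PySem.Dict.nodup_keys_foldl_modify_key L Prod.fst [] (fun _ p l => l ++ [p.2])
      PySem.Dict.empty (by simp [PySem.Dict.keys_empty])
  have hkeys : D.keys = PySem.Set.ofList (dict.flatMap (fun dic => (PySem.Dict.ofList dic).keys)) := by
    rw [hD, PySem.Dict.keys_foldl_modify_key L Prod.fst [] (fun _ p l => l ++ [p.2]),
      PySem.Dict.keys_empty, PySem.Set.update_nil_left, hL, List.map_flatMap]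
    rfl
  rw [PySem.Dict.items_eq_map_keys D hnodup [], hkeys]
  refine List.map_congr_left (fun k _ => ?_)
  have hget : D.getD k [] = dict.filterMap (fun dic => (PySem.Dict.ofList dic).get? k) := by
    rw [hD, PySem.Dict.getD_foldl_modify_append, PySem.Dict.getD_empty, List.nil_append, hL,
      List.filter_flatMap, List.map_flatMap]
    rw [← pv_flatMap_toList dict (fun dic => (PySem.Dict.ofList dic).get? k)]
    exact List.flatMap_congr (fun dic _ =>
      pv_filter_items (PySem.Dict.ofList dic) k (PySem.Dict.nodup_keys_ofList dic))
  rw [hget]
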